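-- pv_equiv track=rewrite | github.com/flowmari/TreasureRun-Spigot-Plugin | scripts/fix_duplicate_command_blocks.py | split_top_level_sections
-- ===== SOURCE A (Python) =====
-- def split_top_level_sections(lines):
--     sections = []
--     current_name = None
--     current_lines = []
--     for line in lines:
--         if line and not line.startswith(" ") and line.endswith(":"):
--             if current_name is not None:
--                 sections.append((current_name, current_lines))
--             current_name = line[:-1]
--             current_lines = [line]
--         else:
--             if current_name is None:
--                 current_name = "__preamble__"
--                 current_lines = []
--             current_lines.append(line)
--     if current_name is not None:
--         sections.append((current_name, current_lines))
--     return sections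
-- ===== SOURCE B (Python) =====
-- def split_top_level_sections(lines):
--     def is_header(l):
--         return bool(l) and not l.startswith(" ") and l.endswith(":")
--
--     p = 0
--     while p < len(lines) and not is_header(lines[p]):
--         p += 1
--     pre = lines[:p]
--     sections = [("__preamble__", pre)] if pre else []
--     rest = lines[p:]  # starts with a header line (or is empty)
--     while rest:
--         head, tail = rest[0], rest[1:]
--         k = 0
--         while k < len(tail) and not is_header(tail[k]):
--             k += 1
--         sections.append((head[:-1], [head] + tail[:k]))
--         rest = tail[k:]
--     return sections
-- ===== Notes on version B (the rewrite author's own statement) =====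
-- stated objective: alternative
-- what changed: Replaces A's single-pass mutable accumulator (current_name/current_lines with a final flush) by a split-at-headers decomposition: take the non-header prefix as an optional __preamble__ section, then recursively cut the remainder at each header line into (header-minus-colon, slice) sections.
import Mathlib
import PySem

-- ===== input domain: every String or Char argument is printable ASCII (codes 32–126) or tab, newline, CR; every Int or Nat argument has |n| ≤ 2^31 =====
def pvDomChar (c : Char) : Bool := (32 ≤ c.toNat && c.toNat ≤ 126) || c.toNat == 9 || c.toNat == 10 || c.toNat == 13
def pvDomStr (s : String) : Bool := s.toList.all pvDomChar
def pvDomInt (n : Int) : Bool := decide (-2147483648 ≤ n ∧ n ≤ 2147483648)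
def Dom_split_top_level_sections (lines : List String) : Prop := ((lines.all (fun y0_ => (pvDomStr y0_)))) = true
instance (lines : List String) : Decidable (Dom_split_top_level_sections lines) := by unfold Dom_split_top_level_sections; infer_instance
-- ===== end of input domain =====

-- B replaces A's single-pass mutable accumulator with a split-at-headers decomposition
-- (optional __preamble__ prefix, then recursive cutting at header lines); objective: alternative.

-- ===== PORT A =====
-- the for-loop over `lines` with state (sections, current_name, current_lines);
-- the [] case performs the final flush.  line[:-1] is ported as String.ofList l.toList.dropLast
-- (exact: drops the last character, "" stays "").
def pvLoopA : List String → List (String × List String) → Option String → List String → List (String × List String)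
  | [], secs, none, _ => secs
  | [], secs, some n, cur => secs ++ [(n, cur)]
  | l :: rest, secs, cn, cur =>
    if !(l == "") && !(PySem.Str.startswith l " ") && PySem.Str.endswith l ":" then
      match cn with
      | some n => pvLoopA rest (secs ++ [(n, cur)]) (some (String.ofList l.toList.dropLast)) [l]
      | none   => pvLoopA rest secs (some (String.ofList l.toList.dropLast)) [l]
    else
      match cn with
      | none   => pvLoopA rest secs (some "__preamble__") [l]
      | some n => pvLoopA rest secs (some n) (cur ++ [l])

def split_top_level_sections (lines : List String) : List (String × List String) :=
  pvLoopA lines [] none []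

-- ===== PORT B =====
-- is_header, exactly Source B's test
def pvIsHeader (l : String) : Bool :=
  !(l == "") && !(PySem.Str.startswith l " ") && PySem.Str.endswith l ":"

-- Source B's `while rest:` section loop, as the obvious structural recursion: the inner
-- `while k < len(tail) and not is_header(tail[k])` scan plus the slices tail[:k] / tail[k:]
-- are exactly takeWhile / dropWhile of the non-header predicate.
def pvChunks : List String → List (String × List String)
  | [] => []
  | h :: t =>
    (String.ofList h.toList.dropLast, h :: t.takeWhile (fun l => !pvIsHeader l))
      :: pvChunks (t.dropWhile (fun l => !pvIsHeader l))
  termination_by l => l.length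
  decreasing_by
    simpa using Nat.lt_succ_of_le (List.length_dropWhile_le _ _)

def split_top_level_sections_alt (lines : List String) : List (String × List String) :=
  let pre := lines.takeWhile (fun l => !pvIsHeader l)
  (if pre = [] then [] else [("__preamble__", pre)])
    ++ pvChunks (lines.dropWhile (fun l => !pvIsHeader l))

-- ===== PRECONDITION & SPEC =====
def Spec_split_top_level_sections (lines : List String) (out : List (String × List String)) : Prop := out = split_top_level_sections_alt lines
instance (lines : List String) (out : List (String × List String)) : Decidable (Spec_split_top_level_sections lines out) := by unfold Spec_split_top_level_sections; infer_instance

-- ===== CLAIM (what is proved, stated in full; the proofs are below) =====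
def Claim_equal_split_top_level_sections : Prop := ∀ (lines : List String), Dom_split_top_level_sections lines → Spec_split_top_level_sections lines (split_top_level_sections lines)

-- ===== LEMMAS AND PROOFS =====

-- one unfolding step of A's loop, with the inline header test folded to pvIsHeader (definitional)
theorem pvLoopA_cons (l : String) (t : List String) (secs : List (String × List String))
    (cn : Option String) (cur : List String) :
    pvLoopA (l :: t) secs cn cur =
      if pvIsHeader l then
        match cn with
        | some n => pvLoopA t (secs ++ [(n, cur)]) (some (String.ofList l.toList.dropLast)) [l]
        | none   => pvLoopA t secs (some (String.ofList l.toList.dropLast)) [l]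
      else
        match cn with
        | none   => pvLoopA t secs (some "__preamble__") [l]
        | some n => pvLoopA t secs (some n) (cur ++ [l]) := rfl

-- the accumulated `sections` list only ever gets appended to
theorem pvLoopA_append (rest : List String) (s1 s2 : List (String × List String))
    (cn : Option String) (cur : List String) :
    pvLoopA rest (s1 ++ s2) cn cur = s1 ++ pvLoopA rest s2 cn cur := by
  induction rest generalizing s2 cn cur with
  | nil => cases cn <;> simp [pvLoopA]
  | cons l t ih =>
    rw [pvLoopA_cons, pvLoopA_cons]
    by_cases hc : pvIsHeader l = true
    · rw [if_pos hc, if_pos hc]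
      cases cn with
      | none => dsimp only; exact ih _ _ _
      | some n => dsimp only; rw [List.append_assoc]; exact ih _ _ _
    · rw [if_neg hc, if_neg hc]
      cases cn with
      | none => dsimp only; exact ih _ _ _
      | some n => dsimp only; exact ih _ _ _

-- once a section is open, the loop collects the non-header suffix into it and then chunks the rest
theorem pvLoopA_some (rest : List String) (n : String) (cur : List String) :
    pvLoopA rest [] (some n) cur =
      (n, cur ++ rest.takeWhile (fun l => !pvIsHeader l))
        :: pvChunks (rest.dropWhile (fun l => !pvIsHeader l)) := by
  induction rest generalizing n cur with
  | nil => simp [pvLoopA, pvChunks]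
  | cons l t ih =>
    rw [pvLoopA_cons]
    by_cases hc : pvIsHeader l = true
    · rw [if_pos hc]
      have h2 := pvLoopA_append t [(n, cur)] [] (some (String.ofList l.toList.dropLast)) [l]
      simp only [List.append_nil] at h2
      dsimp only
      rw [List.nil_append, h2, ih]
      simp [List.takeWhile_cons, List.dropWhile_cons, hc, pvChunks]
    · rw [if_neg hc]
      dsimp only
      rw [ih]
      simp [List.takeWhile_cons, List.dropWhile_cons, hc]

-- ===== VERDICT (by name: the statement is the Claim_ definition above) =====
theorem split_top_level_sections_spec : Claim_equal_split_top_level_sections := by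
  intro lines _
  unfold Spec_split_top_level_sections split_top_level_sections split_top_level_sections_alt
  cases lines with
  | nil => simp [pvLoopA, pvChunks]
  | cons l t =>
    rw [pvLoopA_cons]
    by_cases hc : pvIsHeader l = true
    · rw [if_pos hc]
      dsimp only
      rw [pvLoopA_some]
      simp [List.takeWhile_cons, List.dropWhile_cons, hc, pvChunks]
    · rw [if_neg hc]
      dsimp only
      rw [pvLoopA_some]
      simp [List.takeWhile_cons, List.dropWhile_cons, hc]
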